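-- pv_equiv track=rewrite | github.com/hanna5020/mysite | mysite/l1.py | solution
-- ===== SOURCE A (Python) =====
-- def solution(A):
--     n = len(A)
--     if n < 2:
--         return 0
--
--     sum_positions = {}
--     max_count = 0
--
--     for i in range(n - 1):
--         segment_sum = A[i] + A[i + 1]
--         if segment_sum not in sum_positions:
--             sum_positions[segment_sum] = []
--         sum_positions[segment_sum].append(i)
--
--     for positions in sum_positions.values():
--         count = 1
--         last_pos = positions[0]
--         for pos in positions[1:]:
--             if pos > last_pos + 1:
--                 count += 1
--                 last_pos = pos
--         max_count = max(max_count, count)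
--
--     return max_count
-- ===== SOURCE B (Python) =====
-- def solution(A):
--     n = len(A)
--     if n < 2:
--         return 0
--     state = {}  # pair sum -> (greedy count so far, position of last taken pair)
--     for i in range(n - 1):
--         s = A[i] + A[i + 1]
--         if s not in state:
--             state[s] = (1, i)
--         else:
--             c, last = state[s]
--             if i > last + 1:
--                 state[s] = (c + 1, i)
--     return max((c for c, _ in state.values()), default=0)
-- ===== Notes on version B (the rewrite author's own statement) =====
-- stated objective: alternative
-- what changed: The build-a-dict-of-position-lists phase followed by a per-list greedy scan is fused into one streaming pass that keeps only (count, last_taken_position) per pair sum, so no position lists are ever materialised and the second pass over the dict values reduces to a max of stored counts.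
import Mathlib
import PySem

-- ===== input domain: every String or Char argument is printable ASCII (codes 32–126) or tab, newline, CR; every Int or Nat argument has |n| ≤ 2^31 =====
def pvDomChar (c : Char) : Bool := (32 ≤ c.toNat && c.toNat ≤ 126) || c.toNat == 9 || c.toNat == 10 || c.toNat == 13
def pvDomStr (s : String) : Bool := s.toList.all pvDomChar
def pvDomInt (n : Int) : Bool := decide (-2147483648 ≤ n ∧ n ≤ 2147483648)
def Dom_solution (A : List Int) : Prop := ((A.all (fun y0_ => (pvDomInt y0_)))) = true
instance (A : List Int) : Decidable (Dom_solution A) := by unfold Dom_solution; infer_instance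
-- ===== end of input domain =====

-- B fuses A's build-position-lists-then-greedy-scan into one streaming pass keeping only
-- (count, last taken position) per pair sum (objective: alternative; same O(n) cost).


-- ===== PORT A =====
-- segment_sum = A[i] + A[i + 1]; both indexes are in range for every i that range(n-1) produces,
-- so pyGetD with default 0 is exact there (shared by both ports, which compute the same expression)
def pvSum (A : List Int) (i : Int) : Int :=
  PySem.List.pyGetD A i 0 + PySem.List.pyGetD A (i + 1) 0

-- 'if s not in sp: sp[s] = []' followed by 'sp[s].append(i)' is exactly sp[s] = sp.get(s, []) + [i]
def pvStepA (f : Int → Int) (d : PySem.Dict Int (List Int)) (i : Int) : PySem.Dict Int (List Int) :=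
  d.modify (f i) [] (fun l => l ++ [i])

-- inner greedy loop of A's second pass: count = 1; last_pos = positions[0]; for pos in positions[1:] …
-- positions[0] via pyGetD 0: every positions list in sum_positions is nonempty, so this is exact
def pvGreedy (positions : List Int) : Int × Int :=
  (PySem.List.slice positions (some 1) none).foldl
    (fun st pos => if pos > st.2 + 1 then (st.1 + 1, pos) else st)
    (1, PySem.List.pyGetD positions 0 0)

def solution (A : List Int) : Int :=
  let n : Int := A.length
  if n < 2 then 0
  else
    let sp : PySem.Dict Int (List Int) :=
      (PySem.List.pyRange 0 (n - 1) 1).foldl (pvStepA (pvSum A)) PySem.Dict.empty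
    sp.values.foldl (fun mx positions => max mx (pvGreedy positions).1) 0

-- ===== PORT B =====
def pvStepB (f : Int → Int) (d : PySem.Dict Int (Int × Int)) (i : Int) : PySem.Dict Int (Int × Int) :=
  let s := f i
  match d.get? s with
  | none => d.insert s (1, i)
  | some (c, last) => if i > last + 1 then d.insert s (c + 1, i) else d

def solution_alt (A : List Int) : Int :=
  let n : Int := A.length
  if n < 2 then 0
  else
    let st : PySem.Dict Int (Int × Int) :=
      (PySem.List.pyRange 0 (n - 1) 1).foldl (pvStepB (pvSum A)) PySem.Dict.empty
    -- max((c for c, _ in state.values()), default=0)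
    (PySem.List.max? (st.values.map Prod.fst) (fun y => y)).getD 0

-- ===== PRECONDITION & SPEC =====
def Spec_solution (A : List Int) (out : Int) : Prop := out = solution_alt A
instance (A : List Int) (out : Int) : Decidable (Spec_solution A out) := by unfold Spec_solution; infer_instance

-- ===== CLAIM (what is proved, stated in full; the proofs are below) =====
def Claim_equal_solution : Prop := ∀ (A : List Int), Dom_solution A → Spec_solution A (solution A)

-- ===== LEMMAS AND PROOFS =====

theorem pvGreedy_single (i : Int) : pvGreedy [i] = (1, i) := rfl

theorem pvGreedy_append (ps : List Int) (hps : ps ≠ []) (i : Int) :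
    pvGreedy (ps ++ [i]) =
      (if i > (pvGreedy ps).2 + 1 then ((pvGreedy ps).1 + 1, i) else pvGreedy ps) := by
  cases ps with
  | nil => exact absurd rfl hps
  | cons a t =>
    simp [pvGreedy, PySem.List.slice_from_one, PySem.List.pyGetD_zero, List.foldl_append]

theorem pvGreedy_count_pos (ps : List Int) : 1 ≤ (pvGreedy ps).1 := by
  have h : ∀ (l : List Int) (st : Int × Int),
      st.1 ≤ (l.foldl (fun st pos => if pos > st.2 + 1 then (st.1 + 1, pos) else st) st).1 := by
    intro l
    induction l with
    | nil => intro st; simp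
    | cons x t ih =>
      intro st
      simp only [List.foldl_cons]
      split_ifs with h
      · exact le_trans (by omega) (ih _)
      · exact ih st
  exact h _ _

-- the loop invariant: B's streaming dict carries exactly the greedy state of A's position lists
theorem pv_inv (f : Int → Int) (L : List Int) (dA : PySem.Dict Int (List Int))
    (dB : PySem.Dict Int (Int × Int))
    (hk : dB.keys = dA.keys) (hnd : dA.keys.Nodup)
    (hv : ∀ k ∈ dA.keys, dA.getD k [] ≠ [] ∧ dB.getD k (0, 0) = pvGreedy (dA.getD k [])) :
    (L.foldl (pvStepB f) dB).keys = (L.foldl (pvStepA f) dA).keys ∧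
    (L.foldl (pvStepA f) dA).keys.Nodup ∧
    ∀ k ∈ (L.foldl (pvStepA f) dA).keys,
      (L.foldl (pvStepA f) dA).getD k [] ≠ [] ∧
      (L.foldl (pvStepB f) dB).getD k (0, 0) = pvGreedy ((L.foldl (pvStepA f) dA).getD k []) := by
  induction L generalizing dA dB with
  | nil => exact ⟨hk, hnd, hv⟩
  | cons i L ih =>
    simp only [List.foldl_cons]
    have hcB : dB.contains (f i) = dA.contains (f i) := by
      rw [PySem.Dict.contains_eq_decide_mem_keys, PySem.Dict.contains_eq_decide_mem_keys, hk]
    by_cases hc : dA.contains (f i) = true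
    · -- existing key: A appends i to the list, B advances the stored greedy state
      have hmem : f i ∈ dA.keys := by
        have := PySem.Dict.contains_eq_decide_mem_keys dA (f i)
        rw [hc] at this; exact of_decide_eq_true this.symm
      obtain ⟨hne, hgd⟩ := hv (f i) hmem
      have hget : dB.get? (f i) = some (dB.getD (f i) (0, 0)) := by
        have hcB' : dB.contains (f i) = true := hcB.trans hc
        cases hgb : dB.get? (f i) with
        | none =>
          rw [PySem.Dict.get?_eq_none_iff_contains] at hgb
          rw [hgb] at hcB'; exact absurd hcB' (by simp)
        | some v =>
          rw [PySem.Dict.getD_eq_get?_getD, hgb]; rfl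
      have hA' : (pvStepA f dA i).keys = dA.keys := by
        rw [pvStepA, PySem.Dict.keys_modify, PySem.Dict.keys_insert_of_contains _ _ hc]
      have hBstep : pvStepB f dB i =
          (if i > (dB.getD (f i) (0, 0)).2 + 1
            then dB.insert (f i) ((dB.getD (f i) (0, 0)).1 + 1, i) else dB) := by
        rw [pvStepB]
        simp only [hget]
      have hB' : (pvStepB f dB i).keys = dA.keys := by
        rw [hBstep]
        split_ifs with h
        · rw [PySem.Dict.keys_insert_of_contains _ _ (hcB.trans hc), hk]
        · exact hk
      refine ih (pvStepA f dA i) (pvStepB f dB i) (hB'.trans hA'.symm) (hA' ▸ hnd) ?_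
      intro k hkmem
      rw [hA'] at hkmem
      obtain ⟨hne', hgd'⟩ := hv k hkmem
      by_cases hks : k = f i
      · subst hks
        constructor
        · rw [pvStepA, PySem.Dict.getD_modify]; simp
        · rw [pvStepA, PySem.Dict.getD_modify, if_pos rfl,
              pvGreedy_append _ hne', hBstep, ← hgd]
          split_ifs with h
          · rw [PySem.Dict.getD_insert]; simp
          · rfl
      · constructor
        · rw [pvStepA, PySem.Dict.getD_modify, if_neg hks]; exact hne'
        · rw [pvStepA, PySem.Dict.getD_modify, if_neg hks, hBstep]
          split_ifs with h
          · rw [PySem.Dict.getD_insert, if_neg hks]; exact hgd'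
          · exact hgd'
    · -- fresh key: A starts the list [i], B starts the state (1, i)
      have hc' : dA.contains (f i) = false := by
        cases h : dA.contains (f i)
        · rfl
        · exact absurd h hc
      have hnmem : f i ∉ dA.keys := by
        intro hm
        have := PySem.Dict.contains_eq_decide_mem_keys dA (f i)
        rw [hc'] at this
        exact absurd hm (of_decide_eq_false this.symm)
      have hgB : dB.get? (f i) = none := by
        rw [PySem.Dict.get?_eq_none_iff_contains]
        exact hcB.trans hc'
      have hBstep : pvStepB f dB i = dB.insert (f i) (1, i) := by
        rw [pvStepB]; simp only [hgB]
      have hA' : (pvStepA f dA i).keys = dA.keys ++ [f i] := by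
        rw [pvStepA, PySem.Dict.keys_modify, PySem.Dict.keys_insert_of_not_contains _ _ hc']
      have hB' : (pvStepB f dB i).keys = dA.keys ++ [f i] := by
        rw [hBstep, PySem.Dict.keys_insert_of_not_contains _ _ (hcB.trans hc'), hk]
      refine ih (pvStepA f dA i) (pvStepB f dB i) (hB'.trans hA'.symm) ?_ ?_
      · rw [hA']
        rw [List.nodup_append]
        refine ⟨hnd, List.nodup_singleton _, ?_⟩
        intro a ha b hb
        rw [List.mem_singleton] at hb
        subst hb
        exact fun h => hnmem (h ▸ ha)
      intro k hkmem
      rw [hA'] at hkmem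
      by_cases hks : k = f i
      · subst hks
        constructor
        · rw [pvStepA, PySem.Dict.getD_modify, if_pos rfl,
              PySem.Dict.getD_of_not_contains _ _ hc']
          simp
        · rw [pvStepA, PySem.Dict.getD_modify, if_pos rfl,
              PySem.Dict.getD_of_not_contains _ _ hc', hBstep,
              PySem.Dict.getD_insert, if_pos rfl]
          simp [pvGreedy_single]
      · have hkmem' : k ∈ dA.keys := by
          rcases List.mem_append.mp hkmem with h | h
          · exact h
          · simp at h; exact absurd h hks
        obtain ⟨hne', hgd'⟩ := hv k hkmem'
        constructor
        · rw [pvStepA, PySem.Dict.getD_modify, if_neg hks]; exact hne'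
        · rw [pvStepA, PySem.Dict.getD_modify, if_neg hks, hBstep,
              PySem.Dict.getD_insert, if_neg hks]; exact hgd'

-- max over a list of values that are all ≥ 1: A's running max from 0 equals B's max-with-default-0
theorem pv_max_eq (l : List Int) (h : ∀ x ∈ l, 1 ≤ x) :
    l.foldl max 0 = (PySem.List.max? l (fun y => y)).getD 0 := by
  cases l with
  | nil => rfl
  | cons x t =>
    rw [PySem.List.max?_id_cons]
    have hx : max 0 x = x := max_eq_right (le_trans (by norm_num) (h x (by simp)))
    simp [hx]

theorem solution_eq_alt (A : List Int) : solution A = solution_alt A := by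
  rw [solution, solution_alt]
  by_cases hn : (A.length : Int) < 2
  · simp [hn]
  · simp only [if_neg hn]
    obtain ⟨hk, hnd, hv⟩ := pv_inv (pvSum A) (PySem.List.pyRange 0 ((A.length : Int) - 1) 1)
      PySem.Dict.empty PySem.Dict.empty (by rfl) PySem.Dict.nodup_keys_empty (by intro k hk; simp at hk)
    set dA := (PySem.List.pyRange 0 ((A.length : Int) - 1) 1).foldl (pvStepA (pvSum A)) PySem.Dict.empty
    set dB := (PySem.List.pyRange 0 ((A.length : Int) - 1) 1).foldl (pvStepB (pvSum A)) PySem.Dict.empty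
    rw [PySem.Dict.values_eq_map_keys dA hnd [], PySem.Dict.values_eq_map_keys dB (hk ▸ hnd) (0, 0), hk]
    rw [List.map_map, List.foldl_map]
    have hmapeq : dA.keys.map ((fun p => p.1) ∘ fun k => dB.getD k (0, 0)) =
        dA.keys.map (fun k => (pvGreedy (dA.getD k [])).1) := by
      apply List.map_congr_left
      intro k hkm
      simp [(hv k hkm).2]
    rw [hmapeq]
    have : dA.keys.foldl (fun mx k => max mx (pvGreedy (dA.getD k [])).1) 0 =
        (dA.keys.map (fun k => (pvGreedy (dA.getD k [])).1)).foldl max 0 := by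
      rw [List.foldl_map]
    rw [this, pv_max_eq]
    intro x hx
    simp only [List.mem_map] at hx
    obtain ⟨k, _, hkx⟩ := hx
    rw [← hkx]
    exact pvGreedy_count_pos _

-- ===== VERDICT (by name: the statement is the Claim_ definition above) =====
theorem solution_spec : Claim_equal_solution := by
  intro A _
  unfold Spec_solution
  exact solution_eq_alt A
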